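-- pv_equiv track=rewrite | github.com/respectus/Euler-Problems | euler_helpers.py | letters_to_words
-- ===== SOURCE A (Python) =====
-- def letters_to_words(letters):
--     words = []
--     next = ""
--     for letter in letters:
--         if letter != " ":
--             next += letter
--         else:
--             words.append(next)
--             next = ""
--     return " ".join(words)
-- ===== SOURCE B (Python) =====
-- def letters_to_words(letters):
--     return " ".join(letters.split(" ")[:-1])
-- ===== Notes on version B (the rewrite author's own statement) =====
-- stated objective: faster
-- what changed: Replaces A's explicit char-by-char accumulation loop with a split-then-slice-then-rejoin pipeline: split on the space character, drop the last segment (A never flushes the trailing word), rejoin with spaces.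
import Mathlib
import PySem

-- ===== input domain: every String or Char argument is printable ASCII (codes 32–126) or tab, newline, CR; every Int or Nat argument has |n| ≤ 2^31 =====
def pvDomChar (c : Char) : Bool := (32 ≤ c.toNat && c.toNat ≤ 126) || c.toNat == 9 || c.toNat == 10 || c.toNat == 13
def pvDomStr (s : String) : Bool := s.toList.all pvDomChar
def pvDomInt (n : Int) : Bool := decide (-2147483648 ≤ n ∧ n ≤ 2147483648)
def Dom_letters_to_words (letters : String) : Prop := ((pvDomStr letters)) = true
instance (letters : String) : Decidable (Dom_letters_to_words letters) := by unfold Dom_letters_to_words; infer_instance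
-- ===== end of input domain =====

-- B replaces A's char-by-char accumulation loop with an idiomatic split / drop-last-segment / rejoin pipeline (return value identical).


-- ===== PORT A =====
-- A's loop over the characters; Python strings are ported as List Char (exact on the ASCII domain).
-- State = (words, next); each iteration either appends the letter to `next` or flushes `next` into `words`.
def letters_to_words_step (st : List (List Char) × List Char) (letter : Char) :
    List (List Char) × List Char :=
  if letter ≠ ' ' then (st.1, st.2 ++ [letter]) else (st.1 ++ [st.2], [])

def letters_to_words (letters : String) : String :=
  let st := letters.toList.foldl letters_to_words_step ([], [])
  String.ofList (PySem.Chars.join " ".toList st.1)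

-- ===== PORT B =====
-- Source B: return " ".join(letters.split(" ")[:-1])
def letters_to_words_alt (letters : String) : String :=
  String.ofList
    (PySem.Chars.join " ".toList
      (PySem.List.slice (PySem.Chars.splitOn letters.toList " ".toList) none (some (-1))))

-- ===== PRECONDITION & SPEC =====
def Spec_letters_to_words (letters : String) (out : String) : Prop := out = letters_to_words_alt letters
instance (letters : String) (out : String) : Decidable (Spec_letters_to_words letters out) := by unfold Spec_letters_to_words; infer_instance

-- ===== CLAIM (what is proved, stated in full; the proofs are below) =====
def Claim_equal_letters_to_words : Prop := ∀ (letters : String), Dom_letters_to_words letters → Spec_letters_to_words letters (letters_to_words letters)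

-- ===== LEMMAS AND PROOFS =====

-- The segments of a char list split at every ' ' (the last segment is the unflushed tail).
def pvSegs : List Char → List (List Char)
  | [] => [[]]
  | c :: rest => if c = ' ' then [] :: pvSegs rest else (pvSegs rest).modifyHead (c :: ·)

theorem pvSegs_ne_nil (cs : List Char) : pvSegs cs ≠ [] := by
  cases cs with
  | nil => simp [pvSegs]
  | cons c rest =>
    simp only [pvSegs]
    split_ifs
    · simp
    · cases h : pvSegs rest with
      | nil => exact absurd h (pvSegs_ne_nil rest)
      | cons a l => simp [List.modifyHead]

theorem modifyHead_fun_id {α : Type} (l : List α) : l.modifyHead (fun x => x) = l := by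
  cases l <;> simp [List.modifyHead]

-- splitOn.go with enough fuel computes pvSegs (sep = " ").
theorem splitOn_go_eq (cs : List Char) : ∀ (fuel : Nat) (cur : List Char)
    (acc : List (List Char)), cs.length ≤ fuel →
    PySem.Chars.splitOn.go [' '] fuel cs cur acc
      = acc.reverse ++ (pvSegs cs).modifyHead (cur.reverse ++ ·) := by
  induction cs with
  | nil =>
    intro fuel cur acc _
    cases fuel <;> simp [PySem.Chars.splitOn.go, pvSegs, List.modifyHead]
  | cons c rest ih =>
    intro fuel cur acc hf
    cases fuel with
    | zero => simp at hf
    | succ fuel =>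
      by_cases hc : c = ' '
      · subst hc
        have hpre : [' '].isPrefixOf (' ' :: rest) = true := by
          simp [List.isPrefixOf]
        rw [PySem.Chars.splitOn.go]
        simp only [hpre, if_true, List.length_singleton, List.drop_succ_cons, List.drop_zero]
        rw [ih fuel [] (cur.reverse :: acc) (by simpa using Nat.le_of_succ_le_succ hf)]
        simp [pvSegs, List.modifyHead]
        cases h : pvSegs rest with
        | nil => exact absurd h (pvSegs_ne_nil rest)
        | cons a l => simp
      · have hpre : [' '].isPrefixOf (c :: rest) = false := by
          simp [List.isPrefixOf]
          exact fun h => absurd h.symm hc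
        rw [PySem.Chars.splitOn.go]
        simp only [hpre]
        rw [if_neg (by simp)]
        rw [ih fuel (c :: cur) acc (by simpa using Nat.le_of_succ_le_succ hf)]
        simp only [pvSegs, hc]
        congr 1
        cases h : pvSegs rest with
        | nil => exact absurd h (pvSegs_ne_nil rest)
        | cons a l => simp [List.modifyHead, List.append_assoc]

theorem splitOn_eq_pvSegs (cs : List Char) :
    PySem.Chars.splitOn cs [' '] = pvSegs cs := by
  have h := splitOn_go_eq cs (cs.length + 1) [] [] (Nat.le_succ _)
  simpa [PySem.Chars.splitOn, modifyHead_fun_id] using h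

-- A's fold invariant: the accumulated words are all but the last segment, `next` is the last.
theorem foldl_step_eq (cs : List Char) : ∀ (words : List (List Char)) (next : List Char),
    cs.foldl letters_to_words_step (words, next)
      = (words ++ ((pvSegs cs).modifyHead (next ++ ·)).dropLast,
         ((pvSegs cs).modifyHead (next ++ ·)).getLastD []) := by
  induction cs with
  | nil => intro words next; simp [pvSegs, List.modifyHead]
  | cons c rest ih =>
    intro words next
    by_cases hc : c = ' '
    · subst hc
      simp only [List.foldl_cons, letters_to_words_step, ne_eq, not_true_eq_false,
        if_false, pvSegs, List.modifyHead]
      rw [ih (words ++ [next]) []]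
      cases h : pvSegs rest with
      | nil => exact absurd h (pvSegs_ne_nil rest)
      | cons a l =>
        simp [List.append_assoc, List.getLastD]
    · simp only [List.foldl_cons, letters_to_words_step, ne_eq, not_false_eq_true,
        if_true, pvSegs, hc]
      rw [ih words (next ++ [c])]
      cases h : pvSegs rest with
      | nil => exact absurd h (pvSegs_ne_nil rest)
      | cons a l => simp [List.modifyHead, List.append_assoc]

-- ===== VERDICT (by name: the statement is the Claim_ definition above) =====
theorem letters_to_words_spec : Claim_equal_letters_to_words := by
  intro letters _
  unfold Spec_letters_to_words letters_to_words letters_to_words_alt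
  show String.ofList (PySem.Chars.join " ".toList (letters.toList.foldl letters_to_words_step ([], [])).1) = _
  have hsp : " ".toList = [' '] := rfl
  rw [hsp, splitOn_eq_pvSegs]
  rw [PySem.List.slice_to_neg_one]
  rw [foldl_step_eq letters.toList [] []]
  simp [modifyHead_fun_id]
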